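-- pv_equiv track=rewrite | github.com/Tersect-Browser/Tersect-browser | backend/src/scripts/find_barcode.py | highlight_positions
-- ===== SOURCE A (Python) =====
-- def highlight_positions(seq, positions):
--     highlighted = ''
--     for i, base in enumerate(seq):
--         if i in positions:
--             highlighted += "[" + base + "]"
--         else:
--             highlighted += base
--     return highlighted
-- ===== SOURCE B (Python) =====
-- def highlight_positions(seq, positions):
--     idxs = sorted({p for p in positions if 0 <= p < len(seq)})
--     parts = []
--     prev = 0
--     for pos in idxs:
--         parts.append(seq[prev:pos])
--         parts.append('[' + seq[pos] + ']')
--         prev = pos + 1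
--     parts.append(seq[prev:])
--     return ''.join(parts)
-- ===== Notes on version B (the rewrite author's own statement) =====
-- stated objective: alternative
-- what changed: instead of testing membership at every character and growing the string char by char, B builds the sorted list of distinct in-range highlight indices once and emits the output as plain slices between them joined at the end
import Mathlib
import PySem

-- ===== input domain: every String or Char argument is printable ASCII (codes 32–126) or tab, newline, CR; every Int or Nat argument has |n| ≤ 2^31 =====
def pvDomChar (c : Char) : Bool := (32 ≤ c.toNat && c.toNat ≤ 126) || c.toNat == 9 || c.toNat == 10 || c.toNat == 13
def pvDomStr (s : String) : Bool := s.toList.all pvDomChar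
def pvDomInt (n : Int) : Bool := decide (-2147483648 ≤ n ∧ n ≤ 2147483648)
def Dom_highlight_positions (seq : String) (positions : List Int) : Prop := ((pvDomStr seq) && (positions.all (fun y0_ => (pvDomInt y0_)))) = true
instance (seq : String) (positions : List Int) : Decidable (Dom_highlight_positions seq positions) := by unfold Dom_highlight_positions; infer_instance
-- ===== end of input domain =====

-- B replaces the per-character membership test of A by: sort the distinct in-range
-- highlight indices once, then emit plain slices between them, joined at the end
-- (objective: alternative decomposition; equal return value proved below).

-- ===== PORT A =====
-- for i, base in enumerate(seq): highlighted += "[" + base + "]" if i in positions else base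
def highlight_positions (seq : String) (positions : List Int) : String :=
  String.ofList
    ((PySem.List.enumerate seq.toList 0).foldl
      (fun acc p => if p.1 ∈ positions then acc ++ ['['] ++ [p.2] ++ [']'] else acc ++ [p.2])
      [])

-- ===== PORT B =====
-- one loop step of Source B: parts += [seq[prev:pos], '[' + seq[pos] + ']']; prev = pos + 1
-- (seq[pos] is ported with pyGetD: pos is guaranteed 0 <= pos < len(seq) by the filter,
--  where pyGetD is exactly Python indexing)
def pvStepB (cs : List Char) (st : List (List Char) × Int) (pos : Int) : List (List Char) × Int :=
  (st.1 ++ [PySem.List.slice cs (some st.2) (some pos)]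
       ++ [['['] ++ [PySem.List.pyGetD cs pos ' '] ++ [']']],
   pos + 1)

def highlight_positions_alt (seq : String) (positions : List Int) : String :=
  let cs := seq.toList
  let idxs := PySem.List.sorted
      (PySem.Set.ofList (positions.filter (fun p => decide (0 ≤ p ∧ p < (cs.length : Int)))))
      (fun x => x) false
  let st := idxs.foldl (pvStepB cs) ([], 0)
  String.ofList (PySem.Chars.join [] (st.1 ++ [PySem.List.slice cs (some st.2) none]))

-- ===== PRECONDITION & SPEC =====
def Spec_highlight_positions (seq : String) (positions : List Int) (out : String) : Prop := out = highlight_positions_alt seq positions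
instance (seq : String) (positions : List Int) (out : String) : Decidable (Spec_highlight_positions seq positions out) := by unfold Spec_highlight_positions; infer_instance

-- ===== CLAIM (what is proved, stated in full; the proofs are below) =====
def Claim_equal_highlight_positions : Prop := ∀ (seq : String) (positions : List Int), Dom_highlight_positions seq positions → Spec_highlight_positions seq positions (highlight_positions seq positions)

-- ===== LEMMAS AND PROOFS =====

-- the per-character highlighted text from index i on (reference form both ports reach)
def pvChw (P : List Int) : Int → List Char → List Char
  | _, [] => []
  | i, c :: t => (if i ∈ P then ['[', c, ']'] else [c]) ++ pvChw P (i + 1) t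

theorem pvA_eq (P : List Int) (cs : List Char) :
    ∀ (i : Int) (acc : List Char),
      (PySem.List.enumerate cs i).foldl
        (fun acc p => if p.1 ∈ P then acc ++ ['['] ++ [p.2] ++ [']'] else acc ++ [p.2]) acc
      = acc ++ pvChw P i cs := by
  induction cs with
  | nil => intro i acc; simp [PySem.List.enumerate_nil, pvChw]
  | cons c t ih =>
    intro i acc
    rw [PySem.List.enumerate_cons, List.foldl_cons, ih]
    by_cases h : i ∈ P <;> simp [pvChw, h]

theorem pvChw_false (P : List Int) (cs : List Char) :
    ∀ i : Int, (∀ j : Int, i ≤ j → j < i + cs.length → j ∉ P) → pvChw P i cs = cs := by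
  induction cs with
  | nil => intro i _; rfl
  | cons c t ih =>
    intro i h
    have hi : i ∉ P := h i le_rfl (by simp)
    simp only [pvChw, if_neg hi]
    rw [ih (i + 1) (fun j h1 h2 => h j (by omega) (by simp at h2 ⊢; omega))]
    rfl

theorem pvChw_append (P : List Int) (a b : List Char) :
    ∀ i : Int, pvChw P i (a ++ b) = pvChw P i a ++ pvChw P (i + a.length) b := by
  induction a with
  | nil => intro i; simp [pvChw]
  | cons c t ih =>
    intro i
    simp only [List.cons_append, pvChw, ih (i + 1)]
    have : i + 1 + (t.length : Int) = i + ((t.length : Int) + 1) := by ring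
    simp [this]

theorem pvFold_acc (cs : List Char) (idxs : List Int) :
    ∀ (acc : List (List Char)) (prev : Int),
      idxs.foldl (pvStepB cs) (acc, prev)
      = (acc ++ (idxs.foldl (pvStepB cs) ([], prev)).1, (idxs.foldl (pvStepB cs) ([], prev)).2) := by
  induction idxs with
  | nil => intro acc prev; simp
  | cons pos rest ih =>
    intro acc prev
    simp only [List.foldl_cons]
    rw [ih (pvStepB cs (acc, prev) pos).1 (pvStepB cs (acc, prev) pos).2,
        ih (pvStepB cs ([], prev) pos).1 (pvStepB cs ([], prev) pos).2]
    simp [pvStepB]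

theorem pvJoin_empty (l : List (List Char)) : PySem.Chars.join [] l = l.flatten := by
  induction l with
  | nil => simp [PySem.Chars.join_nil]
  | cons a t ih =>
    cases t with
    | nil => simp [PySem.Chars.join_singleton]
    | cons b u => rw [PySem.Chars.join_cons_cons, List.flatten_cons, ← ih]; simp

theorem pvB_main (cs : List Char) (P : List Int) :
    ∀ (idxs : List Int) (prev : Int), 0 ≤ prev →
      idxs.Pairwise (· < ·) →
      (∀ p ∈ idxs, prev ≤ p ∧ p < (cs.length : Int)) →
      (∀ j : Int, prev ≤ j → j < (cs.length : Int) → (j ∈ P ↔ j ∈ idxs)) →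
      ((idxs.foldl (pvStepB cs) ([], prev)).1
        ++ [PySem.List.slice cs (some (idxs.foldl (pvStepB cs) ([], prev)).2) none]).flatten
      = pvChw P prev (cs.drop prev.toNat) := by
  intro idxs
  induction idxs with
  | nil =>
    intro prev h0 _ _ hiff
    simp only [List.foldl_nil, List.nil_append, List.flatten_cons, List.flatten_nil,
      List.append_nil]
    rw [PySem.List.slice_from cs h0]
    refine (pvChw_false P _ prev ?_).symm
    intro j h1 h2 hjP
    have hlen : ((cs.drop prev.toNat).length : Int) = (cs.length : Int) - min prev (cs.length : Int) := by
      simp [List.length_drop]; omega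
    have hj : j < (cs.length : Int) := by omega
    exact absurd ((hiff j h1 hj).mp hjP) (List.not_mem_nil)
  | cons pos rest ih =>
    intro prev h0 hpw hbnd hiff
    obtain ⟨hprev_pos, hpos_len⟩ := hbnd pos (by simp)
    have hpos0 : (0:Int) ≤ pos := le_trans h0 hprev_pos
    have hpairs : ∀ b ∈ rest, pos < b := (List.pairwise_cons.mp hpw).1
    -- unfold one loop step and pull the accumulator out
    rw [List.foldl_cons, pvFold_acc]
    simp only [pvStepB, List.nil_append]
    -- the slice and the bracketed character
    have hs1 : PySem.List.slice cs (some prev) (some pos)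
        = (cs.drop prev.toNat).take (pos.toNat - prev.toNat) :=
      PySem.List.slice_toNat cs h0 hpos0
    have hget : PySem.List.pyGetD cs pos ' ' = cs[pos.toNat]'(by omega) :=
      PySem.List.pyGetD_eq_getElem cs ' ' hpos0 hpos_len
    -- split the right-hand side at pos
    have hsplit : cs.drop prev.toNat
        = (cs.drop prev.toNat).take (pos.toNat - prev.toNat) ++ cs.drop pos.toNat := by
      conv_lhs => rw [← List.take_append_drop (pos.toNat - prev.toNat) (cs.drop prev.toNat)]
      congr 1
      rw [List.drop_drop]
      congr 1
      omega
    have hulen : (((cs.drop prev.toNat).take (pos.toNat - prev.toNat)).length : Int)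
        = pos - prev := by
      simp [List.length_take, List.length_drop]; omega
    have hchw1 : pvChw P prev ((cs.drop prev.toNat).take (pos.toNat - prev.toNat))
        = (cs.drop prev.toNat).take (pos.toNat - prev.toNat) := by
      refine pvChw_false P _ prev ?_
      intro j h1 h2 hjP
      rw [hulen] at h2
      have hj_lt_pos : j < pos := by omega
      have := (hiff j h1 (by omega)).mp hjP
      rcases List.mem_cons.mp this with h | h
      · omega
      · exact absurd (hpairs j h) (by omega)
    have hdropcons : cs.drop pos.toNat = cs[pos.toNat]'(by omega) :: cs.drop (pos.toNat + 1) :=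
      List.drop_eq_getElem_cons (by omega)
    have hposP : pos ∈ P := (hiff pos hprev_pos hpos_len).mpr (by simp)
    -- IH instance for the tail
    have hih := ih (pos + 1) (by omega) (List.pairwise_cons.mp hpw).2
      (fun p hp => ⟨by have := hpairs p hp; omega, (hbnd p (List.mem_cons_of_mem _ hp)).2⟩)
      (fun j h1 h2 => by
        have h3 := hiff j (by omega) h2
        rw [h3, List.mem_cons]
        constructor
        · rintro (h | h)
          · omega
          · exact h
        · exact Or.inr)
    have htn : (pos + 1).toNat = pos.toNat + 1 := by omega
    rw [htn] at hih
    have key : pvChw P prev (cs.drop prev.toNat)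
        = (cs.drop prev.toNat).take (pos.toNat - prev.toNat)
          ++ (['[', cs[pos.toNat]'(by omega), ']'] ++ pvChw P (pos + 1) (cs.drop (pos.toNat + 1))) := by
      conv_lhs => rw [hsplit]
      rw [pvChw_append, hchw1, hulen]
      have hpp : prev + (pos - prev) = pos := by ring
      rw [hpp, hdropcons]
      simp only [pvChw, if_pos hposP]
    rw [key, ← hih]
    simp [hs1, hget]

theorem highlight_positions_spec : Claim_equal_highlight_positions := by
  intro seq positions _
  unfold Spec_highlight_positions highlight_positions highlight_positions_alt
  dsimp only
  rw [pvA_eq, pvJoin_empty]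
  set cs := seq.toList with hcs
  set idxs := PySem.List.sorted
      (PySem.Set.ofList (positions.filter (fun p => decide (0 ≤ p ∧ p < (cs.length : Int)))))
      (fun x => x) false with hidxs
  have hmem : ∀ j : Int, j ∈ idxs ↔ (j ∈ positions ∧ 0 ≤ j ∧ j < (cs.length : Int)) := by
    intro j
    rw [hidxs, PySem.List.mem_sorted, PySem.Set.mem_ofList, List.mem_filter]
    simp
  have h := pvB_main cs positions idxs 0 le_rfl
    (PySem.List.sorted_ofList_pairwise_lt _)
    (fun p hp => ⟨((hmem p).mp hp).2.1, ((hmem p).mp hp).2.2⟩)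
    (fun j h1 h2 => by rw [hmem]; tauto)
  rw [h]
  simp
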